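-- pv_equiv track=rewrite | github.com/Mahmoud-ABK/NLP-but-in-arabic | 2-data-extraction/archive/concatunate.py | _region_from_indices
-- ===== SOURCE A (Python) =====
-- from typing import List, Any, Dict
-- from typing import List, Dict, Tuple, Callable
-- from typing import List, Optional, Tuple
-- from typing import List, Pattern, Optional
-- from typing import List, Pattern, Optional
--
-- def _region_from_indices(lines: List[str], idxs: List[int], radius: int = 2) -> str:
--     if not idxs:
--         return ""
--     keep = set()
--     for i in idxs:
--         for j in range(max(0, i - radius), min(len(lines), i + radius + 1)):
--             keep.add(j)
--     return "\n".join(lines[i] for i in sorted(keep)).strip()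
-- ===== SOURCE B (Python) =====
-- def _region_from_indices(lines, idxs, radius=2):
--     if not idxs:
--         return ""
--     intervals = []
--     for i in sorted(idxs):
--         lo = max(0, i - radius)
--         hi = min(len(lines), i + radius + 1)
--         if hi <= lo:
--             continue
--         if intervals and lo <= intervals[-1][1]:
--             intervals[-1] = (intervals[-1][0], hi)
--         else:
--             intervals.append((lo, hi))
--     return "\n".join(lines[j] for lo, hi in intervals for j in range(lo, hi)).strip()
-- ===== Notes on version B (the rewrite author's own statement) =====
-- stated objective: faster
-- what changed: Instead of materialising a set of all clamped window indices and sorting that union, B sorts idxs once, merges the clamped windows left-to-right into disjoint intervals, and emits the lines interval by interval.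
import Mathlib
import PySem

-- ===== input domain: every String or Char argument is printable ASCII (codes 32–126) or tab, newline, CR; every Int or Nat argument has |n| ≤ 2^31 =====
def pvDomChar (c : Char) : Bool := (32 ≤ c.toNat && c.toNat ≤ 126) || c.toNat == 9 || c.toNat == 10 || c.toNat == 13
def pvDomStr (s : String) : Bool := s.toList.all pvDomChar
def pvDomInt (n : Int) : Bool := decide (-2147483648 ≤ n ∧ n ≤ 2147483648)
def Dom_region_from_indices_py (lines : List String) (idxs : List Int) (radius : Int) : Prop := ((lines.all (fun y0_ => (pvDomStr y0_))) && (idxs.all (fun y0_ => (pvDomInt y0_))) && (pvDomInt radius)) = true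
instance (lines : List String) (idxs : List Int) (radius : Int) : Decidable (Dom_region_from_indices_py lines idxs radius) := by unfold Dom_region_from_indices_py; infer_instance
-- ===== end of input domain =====

-- B replaces A's set-of-window-indices + sort of the union by sorting idxs once and merging the
-- clamped windows left-to-right into disjoint intervals, then emitting the lines interval by interval.

-- ===== PORT A =====
def region_from_indices_py (lines : List String) (idxs : List Int) (radius : Int) : String :=
  if idxs = [] then "" else
  let keep : PySem.Set Int :=
    idxs.foldl (fun keep i =>
      (PySem.List.pyRange (max 0 (i - radius)) (min (lines.length : Int) (i + radius + 1)) 1).foldl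
        (fun k j => PySem.Set.add k j) keep) PySem.Set.empty
  PySem.Str.strip (PySem.Str.join "\n"
    ((PySem.List.sorted keep (fun x => x) false).map (fun i => PySem.List.pyGetD lines i "")))

-- ===== PORT B =====
-- one merge step: clamp the window of i, skip it if empty, extend the last interval if touching, else append
def rfi_step (n radius : Int) (intervals : List (Int × Int)) (i : Int) : List (Int × Int) :=
  if min n (i + radius + 1) ≤ max 0 (i - radius) then intervals
  else
    match intervals.getLast? with
    | some p =>
        if max 0 (i - radius) ≤ p.2 then intervals.dropLast ++ [(p.1, min n (i + radius + 1))]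
        else intervals ++ [(max 0 (i - radius), min n (i + radius + 1))]
    | none => intervals ++ [(max 0 (i - radius), min n (i + radius + 1))]

def region_from_indices_py_alt (lines : List String) (idxs : List Int) (radius : Int) : String :=
  if idxs = [] then "" else
  let intervals := (PySem.List.sorted idxs (fun x => x) false).foldl
      (rfi_step (lines.length : Int) radius) []
  PySem.Str.strip (PySem.Str.join "\n"
    (intervals.flatMap (fun p =>
      (PySem.List.pyRange p.1 p.2 1).map (fun j => PySem.List.pyGetD lines j ""))))

-- ===== PRECONDITION & SPEC =====
def Spec_region_from_indices_py (lines : List String) (idxs : List Int) (radius : Int) (out : String) : Prop := out = region_from_indices_py_alt lines idxs radius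
instance (lines : List String) (idxs : List Int) (radius : Int) (out : String) : Decidable (Spec_region_from_indices_py lines idxs radius out) := by unfold Spec_region_from_indices_py; infer_instance

-- ===== CLAIM (what is proved, stated in full; the proofs are below) =====
def Claim_equal_region_from_indices_py : Prop := ∀ (lines : List String) (idxs : List Int) (radius : Int), Dom_region_from_indices_py lines idxs radius → Spec_region_from_indices_py lines idxs radius (region_from_indices_py lines idxs radius)

-- ===== LEMMAS AND PROOFS =====

-- the indices covered by a list of intervals
def rfi_cov (I : List (Int × Int)) : List Int := I.flatMap (fun p => PySem.List.pyRange p.1 p.2 1)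

theorem rfi_cov_append (I J : List (Int × Int)) : rfi_cov (I ++ J) = rfi_cov I ++ rfi_cov J := by
  simp [rfi_cov]

-- membership in a fold of Set.add
theorem mem_foldl_set_add (xs : List Int) (s : PySem.Set Int) (y : Int) :
    y ∈ xs.foldl (fun k j => PySem.Set.add k j) s ↔ y ∈ s ∨ y ∈ xs := by
  induction xs generalizing s with
  | nil => simp
  | cons x t ih => simp [ih, PySem.Set.mem_add]; tauto

theorem nodup_foldl_set_add (xs : List Int) (s : PySem.Set Int) (hs : s.Nodup) :
    (xs.foldl (fun k j => PySem.Set.add k j) s).Nodup := by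
  induction xs generalizing s with
  | nil => exact hs
  | cons x t ih => exact ih _ (PySem.Set.nodup_add _ _ hs)

theorem mem_keep (idxs : List Int) (s : PySem.Set Int) (f : Int → List Int) (y : Int) :
    y ∈ idxs.foldl (fun k i => (f i).foldl (fun k j => PySem.Set.add k j) k) s ↔
      y ∈ s ∨ ∃ i ∈ idxs, y ∈ f i := by
  induction idxs generalizing s with
  | nil => simp
  | cons x t ih => simp [ih, mem_foldl_set_add]; tauto

theorem nodup_keep (idxs : List Int) (s : PySem.Set Int) (f : Int → List Int) (hs : s.Nodup) :
    (idxs.foldl (fun k i => (f i).foldl (fun k j => PySem.Set.add k j) k) s).Nodup := by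
  induction idxs generalizing s with
  | nil => exact hs
  | cons x t ih => exact ih _ (nodup_foldl_set_add _ _ hs)

-- A's sorted set of window indices is exactly the filtered range
theorem sorted_keep_eq (lines : List String) (idxs : List Int) (radius : Int) :
    PySem.List.sorted
      (idxs.foldl (fun keep i =>
        (PySem.List.pyRange (max 0 (i - radius)) (min (lines.length : Int) (i + radius + 1)) 1).foldl
          (fun k j => PySem.Set.add k j) keep) PySem.Set.empty) (fun x => x) false =
    (PySem.List.pyRange 0 (lines.length : Int) 1).filter
      (fun j => idxs.any (fun i => decide (i - radius ≤ j) && decide (j ≤ i + radius))) := by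
  apply PySem.List.sorted_eq_of_perm_of_pairwise_lt
  · rw [List.perm_ext_iff_of_nodup (List.Nodup.filter _ (PySem.List.nodup_pyRange_one _ _))
      (nodup_keep idxs PySem.Set.empty (fun i => PySem.List.pyRange (max 0 (i - radius)) (min (lines.length : Int) (i + radius + 1)) 1) List.nodup_nil)]
    intro y
    rw [List.mem_filter, mem_keep idxs PySem.Set.empty (fun i => PySem.List.pyRange (max 0 (i - radius)) (min (lines.length : Int) (i + radius + 1)) 1) y]
    simp only [List.any_eq_true, Bool.and_eq_true, decide_eq_true_eq,
      PySem.List.mem_pyRange_one, PySem.Set.empty, List.not_mem_nil, false_or]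
    constructor
    · rintro ⟨⟨hy1, hy2⟩, i, hi, h1, h2⟩
      exact ⟨i, hi, by omega, by omega⟩
    · rintro ⟨i, hi, h1, h2⟩
      exact ⟨⟨by omega, by omega⟩, i, hi, by omega, by omega⟩
  · exact List.Pairwise.filter _ (PySem.List.pairwise_lt_pyRange_one _ _)

-- B's interval merge covers exactly the filtered range beyond the frontier H
theorem rfi_go (n radius : Int) (s : List Int) :
    ∀ (I : List (Int × Int)) (H : Int),
      s.Pairwise (· ≤ ·) →
      0 ≤ H → H ≤ n →
      (match I.getLast? with | some p => p.2 | none => 0) = H →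
      (∀ p, I.getLast? = some p → p.1 ≤ H ∧ ∀ i ∈ s, p.2 ≤ min n (i + radius + 1)) →
      rfi_cov (s.foldl (rfi_step n radius) I) =
        rfi_cov I ++ (PySem.List.pyRange H n 1).filter
          (fun j => s.any (fun i => decide (i - radius ≤ j) && decide (j ≤ i + radius))) := by
  induction s with
  | nil =>
    intro I H _ _ _ _ _
    simp
  | cons i t ih =>
    intro I H hs hH0 hHn hHdef hlast
    obtain ⟨hall, ht⟩ := List.pairwise_cons.mp hs
    rw [List.foldl_cons]
    by_cases hskip : min n (i + radius + 1) ≤ max 0 (i - radius)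
    · -- empty window: state unchanged, the new idx covers nothing in [H, n)
      have hstep : rfi_step n radius I i = I := by
        simp only [rfi_step, if_pos hskip]
      rw [hstep, ih I H ht hH0 hHn hHdef
        (fun p hp => ⟨(hlast p hp).1, fun i' hi' => (hlast p hp).2 i' (List.mem_cons_of_mem _ hi')⟩)]
      congr 1
      apply List.filter_congr
      intro j hj
      rw [PySem.List.mem_pyRange_one] at hj
      have hW : (decide (i - radius ≤ j) && decide (j ≤ i + radius)) = false := by
        simp only [Bool.and_eq_false_iff, decide_eq_false_iff_not]
        omega
      rw [List.any_cons, hW, Bool.false_or]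
    · rcases hL : I.getLast? with _ | p
      · -- no interval yet: append a new one; H = 0 here
        have hH : H = 0 := by rw [hL] at hHdef; exact hHdef.symm
        have hnew : rfi_step n radius I i = I ++ [(max 0 (i - radius), min n (i + radius + 1))] := by
          simp only [rfi_step, if_neg hskip, hL]
        have hIcov : rfi_cov I = [] := by
          cases I with
          | nil => rfl
          | cons a l => simp at hL
        rw [hnew, ih (I ++ [(max 0 (i - radius), min n (i + radius + 1))]) (min n (i + radius + 1))
          ht (by omega) (by omega)
          (by rw [List.getLast?_concat])
          (by
            intro p hp
            rw [List.getLast?_concat, Option.some.injEq] at hp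
            subst hp
            exact ⟨by omega, fun i' hi' => by have := hall i' hi'; simp; omega⟩)]
        rw [rfi_cov_append, hIcov]
        have hcovnew : rfi_cov [(max 0 (i - radius), min n (i + radius + 1))] =
            PySem.List.pyRange (max 0 (i - radius)) (min n (i + radius + 1)) 1 := by
          simp [rfi_cov]
        rw [hcovnew]
        rw [PySem.List.pyRange_one_append H (max 0 (i - radius)) n (by omega) (by omega),
          PySem.List.pyRange_one_append (max 0 (i - radius)) (min n (i + radius + 1)) n (by omega) (by omega),
          List.filter_append, List.filter_append]
        have h1 : ((PySem.List.pyRange H (max 0 (i - radius)) 1).filter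
            (fun j => (i :: t).any (fun i => decide (i - radius ≤ j) && decide (j ≤ i + radius)))) = [] := by
          rw [List.filter_eq_nil_iff]
          intro j hj
          rw [PySem.List.mem_pyRange_one] at hj
          simp only [List.any_cons, List.any_eq_true, Bool.or_eq_true, Bool.and_eq_true, decide_eq_true_eq]
          rintro (⟨h1, h2⟩ | ⟨i', hi', h1, h2⟩)
          · omega
          · have := hall i' hi'; omega
        have h2 : ((PySem.List.pyRange (max 0 (i - radius)) (min n (i + radius + 1)) 1).filter
            (fun j => (i :: t).any (fun i => decide (i - radius ≤ j) && decide (j ≤ i + radius)))) =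
            PySem.List.pyRange (max 0 (i - radius)) (min n (i + radius + 1)) 1 := by
          rw [List.filter_eq_self]
          intro j hj
          rw [PySem.List.mem_pyRange_one] at hj
          simp only [List.any_cons, Bool.or_eq_true, Bool.and_eq_true, decide_eq_true_eq]
          left
          exact ⟨by omega, by omega⟩
        have h3 : ((PySem.List.pyRange (min n (i + radius + 1)) n 1).filter
            (fun j => (i :: t).any (fun i => decide (i - radius ≤ j) && decide (j ≤ i + radius)))) =
            ((PySem.List.pyRange (min n (i + radius + 1)) n 1).filter
            (fun j => t.any (fun i => decide (i - radius ≤ j) && decide (j ≤ i + radius)))) := by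
          apply List.filter_congr
          intro j hj
          rw [PySem.List.mem_pyRange_one] at hj
          simp only [List.any_cons]
          rw [decide_eq_false (show ¬(j ≤ i + radius) by omega), Bool.and_false, Bool.false_or]
        rw [h1, h2, h3]
        simp
      · -- there is a last interval (p.1, p.2) with p.2 = H
        have hp2 : p.2 = H := by rw [hL] at hHdef; exact hHdef
        obtain ⟨hp1, hrest⟩ := hlast p hL
        have hhi : H ≤ min n (i + radius + 1) := by
          have := hrest i (List.mem_cons_self)
          omega
        have hIsplit : I.dropLast ++ [p] = I := List.dropLast_append_getLast? p hL
        by_cases hmerge : max 0 (i - radius) ≤ p.2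
        · -- touching: extend the last interval to (p.1, hi)
          have hstep : rfi_step n radius I i = I.dropLast ++ [(p.1, min n (i + radius + 1))] := by
            simp only [rfi_step, if_neg hskip, hL, if_pos hmerge]
          rw [hstep, ih (I.dropLast ++ [(p.1, min n (i + radius + 1))]) (min n (i + radius + 1))
            ht (by omega) (by omega)
            (by rw [List.getLast?_concat])
            (by
              intro q hq
              rw [List.getLast?_concat, Option.some.injEq] at hq
              subst hq
              exact ⟨by simp; omega, fun i' hi' => by have := hall i' hi'; simp; omega⟩)]
          rw [rfi_cov_append]
          have hcovnew : rfi_cov [(p.1, min n (i + radius + 1))] =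
              PySem.List.pyRange p.1 H 1 ++ PySem.List.pyRange H (min n (i + radius + 1)) 1 := by
            simp only [rfi_cov, List.flatMap_cons, List.flatMap_nil, List.append_nil]
            exact PySem.List.pyRange_one_append p.1 H (min n (i + radius + 1)) (by omega) (by omega)
          rw [hcovnew]
          conv_rhs => rw [← hIsplit]
          rw [rfi_cov_append]
          have hcovp : rfi_cov [p] = PySem.List.pyRange p.1 H 1 := by
            simp [rfi_cov, hp2]
          rw [hcovp]
          rw [PySem.List.pyRange_one_append H (min n (i + radius + 1)) n (by omega) (by omega),
            List.filter_append]
          have h2 : ((PySem.List.pyRange H (min n (i + radius + 1)) 1).filter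
              (fun j => (i :: t).any (fun i => decide (i - radius ≤ j) && decide (j ≤ i + radius)))) =
              PySem.List.pyRange H (min n (i + radius + 1)) 1 := by
            rw [List.filter_eq_self]
            intro j hj
            rw [PySem.List.mem_pyRange_one] at hj
            simp only [List.any_cons, Bool.or_eq_true, Bool.and_eq_true, decide_eq_true_eq]
            left
            exact ⟨by omega, by omega⟩
          have h3 : ((PySem.List.pyRange (min n (i + radius + 1)) n 1).filter
              (fun j => (i :: t).any (fun i => decide (i - radius ≤ j) && decide (j ≤ i + radius)))) =
              ((PySem.List.pyRange (min n (i + radius + 1)) n 1).filter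
              (fun j => t.any (fun i => decide (i - radius ≤ j) && decide (j ≤ i + radius)))) := by
            apply List.filter_congr
            intro j hj
            rw [PySem.List.mem_pyRange_one] at hj
            simp only [List.any_cons]
            rw [decide_eq_false (show ¬(j ≤ i + radius) by omega), Bool.and_false, Bool.false_or]
          rw [h2, h3]
          simp
        · -- gap: append a new interval; H = p.2 < lo
          have hstep : rfi_step n radius I i = I ++ [(max 0 (i - radius), min n (i + radius + 1))] := by
            simp only [rfi_step, if_neg hskip, hL, if_neg hmerge]
          rw [hstep, ih (I ++ [(max 0 (i - radius), min n (i + radius + 1))]) (min n (i + radius + 1))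
            ht (by omega) (by omega)
            (by rw [List.getLast?_concat])
            (by
              intro q hq
              rw [List.getLast?_concat, Option.some.injEq] at hq
              subst hq
              exact ⟨by omega, fun i' hi' => by have := hall i' hi'; simp; omega⟩)]
          rw [rfi_cov_append]
          have hcovnew : rfi_cov [(max 0 (i - radius), min n (i + radius + 1))] =
              PySem.List.pyRange (max 0 (i - radius)) (min n (i + radius + 1)) 1 := by
            simp [rfi_cov]
          rw [hcovnew]
          rw [PySem.List.pyRange_one_append H (max 0 (i - radius)) n (by omega) (by omega),
            PySem.List.pyRange_one_append (max 0 (i - radius)) (min n (i + radius + 1)) n (by omega) (by omega),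
            List.filter_append, List.filter_append]
          have h1 : ((PySem.List.pyRange H (max 0 (i - radius)) 1).filter
              (fun j => (i :: t).any (fun i => decide (i - radius ≤ j) && decide (j ≤ i + radius)))) = [] := by
            rw [List.filter_eq_nil_iff]
            intro j hj
            rw [PySem.List.mem_pyRange_one] at hj
            simp only [List.any_cons, List.any_eq_true, Bool.or_eq_true, Bool.and_eq_true, decide_eq_true_eq]
            rintro (⟨h1, h2⟩ | ⟨i', hi', h1, h2⟩)
            · omega
            · have := hall i' hi'; omega
          have h2 : ((PySem.List.pyRange (max 0 (i - radius)) (min n (i + radius + 1)) 1).filter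
              (fun j => (i :: t).any (fun i => decide (i - radius ≤ j) && decide (j ≤ i + radius)))) =
              PySem.List.pyRange (max 0 (i - radius)) (min n (i + radius + 1)) 1 := by
            rw [List.filter_eq_self]
            intro j hj
            rw [PySem.List.mem_pyRange_one] at hj
            simp only [List.any_cons, Bool.or_eq_true, Bool.and_eq_true, decide_eq_true_eq]
            left
            exact ⟨by omega, by omega⟩
          have h3 : ((PySem.List.pyRange (min n (i + radius + 1)) n 1).filter
              (fun j => (i :: t).any (fun i => decide (i - radius ≤ j) && decide (j ≤ i + radius)))) =
              ((PySem.List.pyRange (min n (i + radius + 1)) n 1).filter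
              (fun j => t.any (fun i => decide (i - radius ≤ j) && decide (j ≤ i + radius)))) := by
            apply List.filter_congr
            intro j hj
            rw [PySem.List.mem_pyRange_one] at hj
            simp only [List.any_cons]
            rw [decide_eq_false (show ¬(j ≤ i + radius) by omega), Bool.and_false, Bool.false_or]
          rw [h1, h2, h3]
          simp

-- ===== VERDICT (by name: the statement is the Claim_ definition above) =====
theorem region_from_indices_py_spec : Claim_equal_region_from_indices_py := by
  intro lines idxs radius _
  unfold Spec_region_from_indices_py region_from_indices_py region_from_indices_py_alt
  by_cases h : idxs = []
  · simp [h]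
  · simp only [h, reduceIte]
    congr 1
    congr 1
    rw [sorted_keep_eq]
    rw [← List.map_flatMap]
    have hcov := rfi_go (lines.length : Int) radius (PySem.List.sorted idxs (fun x => x) false)
      [] 0 (PySem.List.sorted_pairwise idxs (fun x => x)) le_rfl (by positivity) rfl
      (by intro p hp; simp at hp)
    have hfold : (((PySem.List.sorted idxs (fun x => x) false).foldl (rfi_step (lines.length : Int) radius) []).flatMap
        (fun p => PySem.List.pyRange p.1 p.2 1)) =
        rfi_cov ((PySem.List.sorted idxs (fun x => x) false).foldl (rfi_step (lines.length : Int) radius) []) := rfl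
    rw [hfold, hcov]
    simp only [rfi_cov, List.flatMap_nil, List.nil_append]
    congr 1
    apply List.filter_congr
    intro j _
    exact List.Perm.any_eq (PySem.List.sorted_perm idxs (fun x => x) false).symm
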